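-- pv_equiv track=rewrite | github.com/jami1005050/InformationRetrieval | evaluation/evaluation.py | relevant_doc_retrieved
-- ===== SOURCE A (Python) =====
-- def relevant_doc_retrieved(query, ranking, relevants_docs_query):
--     true_positives = 0
--     false_positives = 0
--     for doc in ranking:
--         if str(doc[0]) in relevants_docs_query[query]:  # position 3 indicates document ID
--             true_positives += 1
--         else:
--             false_positives += 1
--     return true_positives, false_positives
-- ===== SOURCE B (Python) =====
-- def relevant_doc_retrieved(query, ranking, relevants_docs_query):
--     if not ranking:
--         return 0, 0
--     relevant = relevants_docs_query[query]
--     counts = {}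
--     for doc in ranking:
--         key = str(doc[0])
--         counts[key] = counts.get(key, 0) + 1
--     true_positives = sum(c for k, c in counts.items() if k in relevant)
--     return true_positives, len(ranking) - true_positives
-- ===== Notes on version B (the rewrite author's own statement) =====
-- stated objective: alternative
-- what changed: B first aggregates the ranking into a frequency dict keyed by str(doc[0]) and then sums the counts of the distinct keys that are relevant, deriving false positives from len(ranking); A instead tests membership per document, updating two counters in an if/else loop.
import Mathlib
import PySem

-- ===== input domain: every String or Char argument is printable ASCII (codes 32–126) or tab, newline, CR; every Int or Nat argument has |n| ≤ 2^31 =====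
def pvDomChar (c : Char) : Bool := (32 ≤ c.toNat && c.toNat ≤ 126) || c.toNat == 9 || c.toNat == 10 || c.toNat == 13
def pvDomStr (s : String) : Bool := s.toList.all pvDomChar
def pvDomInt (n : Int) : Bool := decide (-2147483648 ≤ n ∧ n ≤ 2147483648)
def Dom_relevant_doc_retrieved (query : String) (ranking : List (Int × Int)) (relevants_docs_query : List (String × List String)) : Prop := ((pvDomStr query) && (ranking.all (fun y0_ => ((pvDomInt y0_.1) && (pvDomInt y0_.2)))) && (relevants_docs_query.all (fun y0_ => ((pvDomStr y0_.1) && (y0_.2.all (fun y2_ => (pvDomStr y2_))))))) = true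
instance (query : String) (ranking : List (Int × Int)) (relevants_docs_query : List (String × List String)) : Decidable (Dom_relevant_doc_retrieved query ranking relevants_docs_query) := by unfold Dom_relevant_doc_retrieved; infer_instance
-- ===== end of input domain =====

-- B aggregates the ranking into a frequency dict keyed by doc-id string and sums the counts of the
-- relevant distinct keys (membership tested once per distinct id, not once per doc); alternative algorithm, same asymptotic cost.

-- ===== PORT A =====
-- dict lookup relevants_docs_query[query]: first match in the association list; Pre_ guarantees the key
-- is present whenever the lookup runs, so the [] default is never observed on admitted inputs.
def pyLookup (d : List (String × List String)) (k : String) : List String :=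
  ((d.find? (fun p => p.1 == k)).map Prod.snd).getD []

def relevant_doc_retrieved (query : String) (ranking : List (Int × Int)) (relevants_docs_query : List (String × List String)) : Int × Int :=
  ranking.foldl
    (fun (acc : Int × Int) doc =>
      if (pyLookup relevants_docs_query query).contains (PySem.Int.toStr doc.1) then
        (acc.1 + 1, acc.2)
      else
        (acc.1, acc.2 + 1))
    (0, 0)

-- ===== PORT B =====
def relevant_doc_retrieved_alt (query : String) (ranking : List (Int × Int)) (relevants_docs_query : List (String × List String)) : Int × Int :=
  if ranking = [] then (0, 0)
  else
    let relevant := pyLookup relevants_docs_query query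
    let counts : PySem.Dict String Int :=
      ranking.foldl
        (fun d doc => d.insert (PySem.Int.toStr doc.1) (d.getD (PySem.Int.toStr doc.1) 0 + 1))
        PySem.Dict.empty
    let true_positives : Int :=
      counts.items.foldl (fun s p => if relevant.contains p.1 then s + p.2 else s) 0
    (true_positives, (ranking.length : Int) - true_positives)

-- ===== PRECONDITION & SPEC =====
-- Pre_ excludes only the inputs where Python raises KeyError: a non-empty ranking with query absent from the dict.
def Pre_relevant_doc_retrieved (query : String) (ranking : List (Int × Int)) (relevants_docs_query : List (String × List String)) : Prop :=
  ranking = [] ∨ (relevants_docs_query.map Prod.fst).contains query = true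
instance (query : String) (ranking : List (Int × Int)) (relevants_docs_query : List (String × List String)) : Decidable (Pre_relevant_doc_retrieved query ranking relevants_docs_query) := by unfold Pre_relevant_doc_retrieved; infer_instance

def pvWitness_relevant_doc_retrieved : String × (List (Int × Int)) × (List (String × List String)) :=
  ("q", [(1, 2), (3, 4)], [("q", ["1"])])

def Spec_relevant_doc_retrieved (query : String) (ranking : List (Int × Int)) (relevants_docs_query : List (String × List String)) (out : Int × Int) : Prop := out = relevant_doc_retrieved_alt query ranking relevants_docs_query
instance (query : String) (ranking : List (Int × Int)) (relevants_docs_query : List (String × List String)) (out : Int × Int) : Decidable (Spec_relevant_doc_retrieved query ranking relevants_docs_query out) := by unfold Spec_relevant_doc_retrieved; infer_instance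

-- ===== CLAIM (what is proved, stated in full; the proofs are below) =====
def Claim_equal_relevant_doc_retrieved : Prop := ∀ (query : String) (ranking : List (Int × Int)) (relevants_docs_query : List (String × List String)), Dom_relevant_doc_retrieved query ranking relevants_docs_query → Pre_relevant_doc_retrieved query ranking relevants_docs_query → Spec_relevant_doc_retrieved query ranking relevants_docs_query (relevant_doc_retrieved query ranking relevants_docs_query)

-- ===== LEMMAS AND PROOFS =====
-- A's loop with two counters computes (|filter|, |l| - |filter|).
theorem foldl_two_counters {a0 : Type} (p : a0 -> Bool) :
    ∀ (l : List a0) (a b : Int),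
      l.foldl (fun (acc : Int × Int) doc => if p doc then (acc.1 + 1, acc.2) else (acc.1, acc.2 + 1)) (a, b)
        = (a + ((l.filter p).length : Int), b + ((l.length : Int) - ((l.filter p).length : Int))) := by
  intro l
  induction l with
  | nil => intro a b; simp
  | cons x xs ih =>
    intro a b
    by_cases h : p x <;> (simp [h, ih]; ring_nf)

-- a conditional-sum foldl is a sum of a map
theorem foldl_if_add_eq_sum (p : String → Bool) (f : String → Int) :
    ∀ (ks : List String) (s : Int),
      ks.foldl (fun s k => if p k then s + f k else s) s
        = s + (ks.map (fun k => if p k then f k else 0)).sum := by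
  intro ks
  induction ks with
  | nil => intro s; simp
  | cons k ks ih =>
    intro s
    by_cases h : p k <;> simp [h, ih] <;> ring

theorem sum_map_add (f g : String → Int) (ks : List String) :
    (ks.map (fun k => f k + g k)).sum = (ks.map f).sum + (ks.map g).sum := by
  induction ks with
  | nil => simp
  | cons k ks ih => simp [ih]; ring

-- over a nodup list containing x, the indicator at x sums to its value
theorem sum_indicator (x : String) (c : Int) :
    ∀ (ks : List String), ks.Nodup → x ∈ ks →
      (ks.map (fun k => if k = x then c else 0)).sum = c := by
  intro ks
  induction ks with
  | nil => intro _ h; cases h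
  | cons k ks ih =>
    intro hnd hx
    rcases List.nodup_cons.mp hnd with ⟨hk, hnd'⟩
    by_cases h : k = x
    · subst h
      have hz : (ks.map (fun k' => if k' = k then c else 0)).sum = 0 := by
        have hall : ∀ k' ∈ ks, (if k' = k then c else (0 : Int)) = 0 := by
          intro k' hk'
          have : k' ≠ k := by rintro rfl; exact hk hk'
          simp [this]
        rw [List.map_congr_left hall]; simp
      simp [hz]
    · have hx' : x ∈ ks := by
        rcases List.mem_cons.mp hx with h1 | h1
        · exact absurd h1.symm h
        · exact h1
      simp [h, ih hnd' hx']

-- summing per-key counts of xs over a nodup cover of xs gives the filtered length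
theorem sum_counts (p : String → Bool) :
    ∀ (xs ks : List String), ks.Nodup → (∀ x ∈ xs, x ∈ ks) →
      (ks.map (fun k => if p k then (xs.count k : Int) else 0)).sum
        = ((xs.filter p).length : Int) := by
  intro xs
  induction xs with
  | nil =>
    intro ks _ _
    have h0 : ∀ k ∈ ks, (if p k then (List.count k ([] : List String) : Int) else 0) = 0 := by
      intro k _; simp
    rw [List.map_congr_left h0]; simp
  | cons x xs ih =>
    intro ks hnd hcov
    have hx : x ∈ ks := hcov x (by simp)
    have hcov' : ∀ y ∈ xs, y ∈ ks := fun y hy => hcov y (by simp [hy])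
    have hpt : ∀ k ∈ ks,
        (if p k then ((x :: xs).count k : Int) else 0)
          = (if p k then (xs.count k : Int) else 0) + (if p k then (if k = x then 1 else 0) else 0) := by
      intro k _
      rw [List.count_cons]
      by_cases h2 : k = x
      · subst h2; by_cases h : p k <;> simp [h]
      · have hne : (x == k) = false := beq_eq_false_iff_ne.mpr (Ne.symm h2)
        by_cases h : p k <;> simp [h, h2, hne]
    rw [List.map_congr_left hpt, sum_map_add, ih ks hnd hcov']
    have hind : (ks.map (fun k => if p k then (if k = x then (1 : Int) else 0) else 0)).sum
        = if p x then 1 else 0 := by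
      by_cases hpx : p x
      · rw [if_pos hpx]
        calc (ks.map (fun k => if p k then (if k = x then (1 : Int) else 0) else 0)).sum
            = (ks.map (fun k => if k = x then (1 : Int) else 0)).sum := by
              apply congrArg
              apply List.map_congr_left
              intro k _
              by_cases h2 : k = x
              · subst h2; simp [hpx]
              · simp [h2]
          _ = 1 := sum_indicator x 1 ks hnd hx
      · rw [if_neg hpx]
        calc (ks.map (fun k => if p k then (if k = x then (1 : Int) else 0) else 0)).sum
            = (ks.map (fun _ => (0 : Int))).sum := by
              apply congrArg
              apply List.map_congr_left
              intro k _
              by_cases h1 : p k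
              · by_cases h2 : k = x
                · subst h2; exact absurd h1 hpx
                · simp [h1, h2]
              · simp [h1]
          _ = 0 := by simp
    rw [hind]
    by_cases hpx : p x <;> simp [hpx]

-- ===== VERDICT (by name: the statement is the Claim_ definition above) =====
theorem relevant_doc_retrieved_spec : Claim_equal_relevant_doc_retrieved := by
  intro query ranking rel _ _
  unfold Spec_relevant_doc_retrieved relevant_doc_retrieved relevant_doc_retrieved_alt
  rcases eq_or_ne ranking [] with h | h
  · subst h; simp
  · simp only [h, if_false]
    set p : String → Bool := fun k => (pyLookup rel query).contains k with hp
    set key : Int × Int → String := fun doc => PySem.Int.toStr doc.1 with hkey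
    rw [foldl_two_counters (fun doc => p (key doc))]
    -- B's counter equals counter of the mapped keys
    have hcounter :
        ranking.foldl (fun d doc => d.insert (key doc) (d.getD (key doc) 0 + 1)) PySem.Dict.empty
          = PySem.Dict.counter (ranking.map key) := by
      rw [← PySem.Dict.foldl_insert_getD_add_one_eq_counter, List.foldl_map]
    rw [hcounter, PySem.Dict.items_counter, List.foldl_map,
        foldl_if_add_eq_sum p (fun k => ((ranking.map key).count k : Int)),
        sum_counts p (ranking.map key) (PySem.Set.ofList (ranking.map key))
          (PySem.Set.nodup_ofList _) (fun x hx => (PySem.Set.mem_ofList _ _).mpr hx)]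
    have : (ranking.map key).filter p = (ranking.filter (fun doc => p (key doc))).map key :=
      List.filter_map ..
    simp [this]
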